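-- pv_equiv track=rewrite | github.com/Redelyx/Quantum_Leader_Election | test.py | greatest_power_of_2
-- ===== SOURCE A (Python) =====
-- def greatest_power_of_2(n):
--     if n < 1:
--         return None  # Error: n should be a positive integer
--     power = 1
--     while n >= 2:
--         n //= 2
--         power *= 2
--     return power
-- ===== SOURCE B (Python) =====
-- def greatest_power_of_2(n):
--     if n < 1:
--         return None  # Error: n should be a positive integer
--     return 1 << (n.bit_length() - 1)
-- ===== Notes on version B (the rewrite author's own statement) =====
-- stated objective: idiomatic
-- what changed: Replaced the repeated-halving loop accumulating a power variable with a single closed-form bit shift by n.bit_length() minus one.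
import Mathlib
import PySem

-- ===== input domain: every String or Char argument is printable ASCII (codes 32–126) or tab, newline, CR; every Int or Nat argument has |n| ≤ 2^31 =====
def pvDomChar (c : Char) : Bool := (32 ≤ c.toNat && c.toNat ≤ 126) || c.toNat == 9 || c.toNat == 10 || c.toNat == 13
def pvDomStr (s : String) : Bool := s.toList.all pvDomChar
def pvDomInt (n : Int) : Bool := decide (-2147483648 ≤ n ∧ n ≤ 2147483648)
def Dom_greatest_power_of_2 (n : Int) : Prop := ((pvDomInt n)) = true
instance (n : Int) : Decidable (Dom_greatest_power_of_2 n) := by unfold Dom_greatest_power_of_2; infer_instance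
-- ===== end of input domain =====

-- B replaces A's O(log n) halving loop by the closed form 1 << (n.bit_length() - 1) (idiomatic/constant-time).

-- ===== PORT A =====
-- the `while n >= 2: n //= 2; power *= 2` loop; n is positive inside the loop,
-- so `n //= 2` is Nat division on n.toNat (exact there)
def gpLoopA (m : Nat) (power : Int) : Int :=
  if h : m ≥ 2 then gpLoopA (m / 2) (power * 2) else power
decreasing_by exact Nat.div_lt_self (by omega) (by omega)

def greatest_power_of_2 (n : Int) : Option Int :=
  if n < 1 then none
  else some (gpLoopA n.toNat 1)

-- ===== PORT B =====
-- Python's int.bit_length() for a nonnegative integer (exact there: 0 for 0, ⌊log₂ m⌋ + 1 otherwise)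
def bitLength (m : Nat) : Nat := if m = 0 then 0 else Nat.log2 m + 1

def greatest_power_of_2_alt (n : Int) : Option Int :=
  if n < 1 then none
  else some ((1 : Int) <<< (bitLength n.toNat - 1))

-- ===== PRECONDITION & SPEC =====
def Spec_greatest_power_of_2 (n : Int) (out : Option Int) : Prop := out = greatest_power_of_2_alt n
instance (n : Int) (out : Option Int) : Decidable (Spec_greatest_power_of_2 n out) := by unfold Spec_greatest_power_of_2; infer_instance

-- ===== CLAIM (what is proved, stated in full; the proofs are below) =====
def Claim_equal_greatest_power_of_2 : Prop := ∀ (n : Int), Dom_greatest_power_of_2 n → Spec_greatest_power_of_2 n (greatest_power_of_2 n)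

-- ===== LEMMAS AND PROOFS =====
-- loop invariant: for positive m the loop returns power · 2^⌊log₂ m⌋
theorem gpLoopA_eq (m : Nat) (hm : 1 ≤ m) (power : Int) :
    gpLoopA m power = power * 2 ^ Nat.log2 m := by
  induction m using Nat.strong_induction_on generalizing power with
  | _ m ih =>
    rw [gpLoopA]
    conv_rhs => rw [Nat.log2_def]
    by_cases h : m ≥ 2
    · rw [dif_pos h, if_pos h, ih (m / 2) (Nat.div_lt_self (by omega) (by omega))
        (Nat.one_le_div_iff (by omega) |>.mpr h)]
      ring
    · rw [dif_neg h, if_neg h]; ring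

-- ===== VERDICT (by name: the statement is the Claim_ definition above) =====
theorem greatest_power_of_2_spec : Claim_equal_greatest_power_of_2 := by
  intro n _
  unfold Spec_greatest_power_of_2 greatest_power_of_2 greatest_power_of_2_alt
  by_cases h : n < 1
  · simp [h]
  · have hpos : 1 ≤ n.toNat := by omega
    rw [if_neg h, if_neg h, gpLoopA_eq n.toNat hpos 1, bitLength,
      if_neg (by omega), Nat.add_sub_cancel, Int.shiftLeft_eq]
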